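-- pv_equiv track=rewrite | github.com/richdanis/RTAI | code/convolutions_lab.py | enc_tuple
-- ===== SOURCE A (Python) =====
-- from typing import Tuple
--
-- def enc_tuple(tup: Tuple, shape: Tuple) -> int:
--     res = 0
--     coef = 1
--     for i in reversed(range(len(shape))):
--         assert tup[i] < shape[i]
--         res += coef * tup[i]
--         coef *= shape[i]
--
--     return res
-- ===== SOURCE B (Python) =====
-- def enc_tuple(tup, shape):
--     res = 0
--     for i in range(len(shape)):
--         assert tup[i] < shape[i]
--         res = res * shape[i] + tup[i]
--     return res
-- ===== Notes on version B (the rewrite author's own statement) =====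
-- stated objective: simpler
-- what changed: Replaces the backward loop with a separate coefficient accumulator (res += coef*tup[i]; coef *= shape[i]) by a forward Horner scheme keeping a single accumulator (res = res*shape[i] + tup[i]).
import Mathlib
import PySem

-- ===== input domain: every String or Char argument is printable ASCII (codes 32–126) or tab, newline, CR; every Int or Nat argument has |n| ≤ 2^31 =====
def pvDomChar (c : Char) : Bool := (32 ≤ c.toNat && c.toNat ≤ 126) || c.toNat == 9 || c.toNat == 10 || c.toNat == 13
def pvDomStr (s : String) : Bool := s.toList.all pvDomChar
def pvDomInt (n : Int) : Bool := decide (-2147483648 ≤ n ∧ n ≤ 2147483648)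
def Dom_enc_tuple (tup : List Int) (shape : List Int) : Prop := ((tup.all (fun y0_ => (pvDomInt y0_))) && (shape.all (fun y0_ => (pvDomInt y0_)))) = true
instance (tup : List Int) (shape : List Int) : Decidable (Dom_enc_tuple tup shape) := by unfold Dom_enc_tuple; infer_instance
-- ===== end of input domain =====

-- B replaces A's backward loop with a coefficient accumulator by a forward Horner scheme with a single accumulator; same O(n) cost.


-- ===== PORT A =====
-- res = 0; coef = 1; for i in reversed(range(len(shape))): res += coef*tup[i]; coef *= shape[i]; return res
def enc_tuple (tup : List Int) (shape : List Int) : Int :=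
  ((PySem.List.pyRange 0 (PySem.List.len shape) 1).reverse.foldl
    (fun (st : Int × Int) i =>
      (st.1 + st.2 * PySem.List.pyGetD tup i 0, st.2 * PySem.List.pyGetD shape i 0))
    (0, 1)).1

-- ===== PORT B =====
-- res = 0; for i in range(len(shape)): res = res * shape[i] + tup[i]; return res
def enc_tuple_alt (tup : List Int) (shape : List Int) : Int :=
  (PySem.List.pyRange 0 (PySem.List.len shape) 1).foldl
    (fun res i => res * PySem.List.pyGetD shape i 0 + PySem.List.pyGetD tup i 0) 0

-- ===== PRECONDITION & SPEC =====
-- A (and B) raise IndexError if shape is longer than tup, and AssertionError unless tup[i] < shape[i] for every dimension.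
def Pre_enc_tuple (tup : List Int) (shape : List Int) : Prop :=
  shape.length ≤ tup.length ∧ ∀ i, i < shape.length → tup.getD i 0 < shape.getD i 0
instance (tup : List Int) (shape : List Int) : Decidable (Pre_enc_tuple tup shape) := by
  unfold Pre_enc_tuple; infer_instance
def pvWitness_enc_tuple : List Int × List Int := ([1, 2, 0], [3, 4, 5])

def Spec_enc_tuple (tup : List Int) (shape : List Int) (out : Int) : Prop := out = enc_tuple_alt tup shape
instance (tup : List Int) (shape : List Int) (out : Int) : Decidable (Spec_enc_tuple tup shape out) := by unfold Spec_enc_tuple; infer_instance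

-- ===== CLAIM (what is proved, stated in full; the proofs are below) =====
def Claim_equal_enc_tuple : Prop := ∀ (tup : List Int) (shape : List Int), Dom_enc_tuple tup shape → Pre_enc_tuple tup shape → Spec_enc_tuple tup shape (enc_tuple tup shape)

-- ===== LEMMAS AND PROOFS =====

-- Reverse weighted-sum fold equals forward Horner fold, for arbitrary index functions.
theorem horner_rev (t s : Nat → Int) : ∀ (n : Nat) (r c : Int),
    (((List.range n).reverse).foldl
        (fun (st : Int × Int) i => (st.1 + st.2 * t i, st.2 * s i)) (r, c)).1
    = r + c * (List.range n).foldl (fun a i => a * s i + t i) 0 := by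
  intro n
  induction n with
  | zero => intro r c; simp
  | succ n ih =>
    intro r c
    rw [List.range_succ]
    simp only [List.reverse_append, List.reverse_cons, List.reverse_nil, List.nil_append,
      List.cons_append, List.foldl_cons, List.foldl_append]
    rw [ih]
    simp only [List.foldl_nil]
    ring

theorem enc_tuple_spec : Claim_equal_enc_tuple := by
  intro tup shape _ _
  unfold Spec_enc_tuple enc_tuple enc_tuple_alt
  rw [show PySem.List.len shape = ((shape.length : Int)) from PySem.List.len_eq shape,
    PySem.List.pyRange_zero_natCast]
  rw [← List.map_reverse, List.foldl_map, List.foldl_map]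
  simp only [PySem.List.pyGetD_natCast]
  exact horner_rev (fun i => tup.getD i 0) (fun i => shape.getD i 0) shape.length 0 1 |>.trans (by ring)
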